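-- pv_equiv track=rewrite | github.com/Weiguo-Jiang/Kattis-Solutions | phonelist.py | check
-- ===== SOURCE A (Python) =====
-- def check(l):
-- 	s = set()
-- 	for i in l:
-- 		if i in s:
-- 			return 0
-- 		for j in range(1, len(i)+1):
-- 			s.add(i[:j])
-- 	return 1
-- ===== SOURCE B (Python) =====
-- def check(l):
-- 	seen = []
-- 	for i in l:
-- 		if i and any(e.startswith(i) for e in seen):
-- 			return 0
-- 		seen.append(i)
-- 	return 1
-- ===== Notes on version B (the rewrite author's own statement) =====
-- stated objective: alternative
-- what changed: B keeps the list of earlier strings themselves and tests each new string with startswith against them, instead of inserting every prefix of every earlier string into a hash set and doing a membership test.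
import Mathlib
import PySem

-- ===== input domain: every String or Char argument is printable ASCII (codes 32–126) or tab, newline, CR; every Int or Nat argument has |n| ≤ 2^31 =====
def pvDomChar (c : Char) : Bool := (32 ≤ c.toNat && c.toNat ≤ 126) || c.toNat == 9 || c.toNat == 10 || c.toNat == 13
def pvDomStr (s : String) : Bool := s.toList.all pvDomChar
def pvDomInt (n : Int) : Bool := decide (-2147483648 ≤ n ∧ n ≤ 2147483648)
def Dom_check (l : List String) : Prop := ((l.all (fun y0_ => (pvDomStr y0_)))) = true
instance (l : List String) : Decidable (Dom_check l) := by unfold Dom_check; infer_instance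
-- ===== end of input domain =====

-- B replaces A's hash set of all prefixes of the earlier strings by the plain list of
-- earlier strings scanned with startswith — a different data structure, similar cost.

-- ===== PORT A =====
-- the loop of A: state s = set of all (nonempty) prefixes of the earlier strings
def checkGo : List String → PySem.Set String → Int
  | [], _ => 1
  | i :: rest, s =>
      if PySem.Set.contains s i then 0
      else
        checkGo rest
          ((PySem.List.pyRange 1 (PySem.Str.len i + 1) 1).foldl
            (fun acc j => PySem.Set.add acc (PySem.Str.slice i none (some j))) s)

def check (l : List String) : Int := checkGo l PySem.Set.empty

-- ===== PORT B =====
-- the loop of B: state seen = the earlier strings themselves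
def checkAltGo : List String → List String → Int
  | [], _ => 1
  | i :: rest, seen =>
      if i ≠ "" ∧ seen.any (fun e => PySem.Str.startswith e i) = true then 0
      else checkAltGo rest (seen ++ [i])

def check_alt (l : List String) : Int := checkAltGo l []

-- ===== PRECONDITION & SPEC =====
def Spec_check (l : List String) (out : Int) : Prop := out = check_alt l
instance (l : List String) (out : Int) : Decidable (Spec_check l out) := by unfold Spec_check; infer_instance

-- ===== CLAIM (what is proved, stated in full; the proofs are below) =====
def Claim_equal_check : Prop := ∀ (l : List String), Dom_check l → Spec_check l (check l)

-- ===== LEMMAS AND PROOFS =====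

-- membership after folding a set-add over a list
theorem mem_foldl_add {α : Type} [BEq α] [LawfulBEq α] (f : Int → α) (js : List Int)
    (s : PySem.Set α) (x : α) :
    x ∈ js.foldl (fun acc j => PySem.Set.add acc (f j)) s ↔ x ∈ s ∨ ∃ j ∈ js, x = f j := by
  induction js generalizing s with
  | nil => simp
  | cons j js ih =>
      simp only [List.foldl_cons, ih, PySem.Set.mem_add, List.mem_cons]
      constructor
      · rintro ((h | h) | ⟨k, hk, rfl⟩)
        · exact Or.inl h
        · exact Or.inr ⟨j, Or.inl rfl, h⟩
        · exact Or.inr ⟨k, Or.inr hk, rfl⟩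
      · rintro (h | ⟨k, (rfl | hk), rfl⟩)
        · exact Or.inl (Or.inl h)
        · exact Or.inl (Or.inr rfl)
        · exact Or.inr ⟨k, hk, rfl⟩

-- the values A inserts for a string i are exactly the nonempty prefixes of i
theorem slice_range_iff (i x : String) :
    (∃ j ∈ PySem.List.pyRange 1 (PySem.Str.len i + 1) 1, x = PySem.Str.slice i none (some j)) ↔
      (x ≠ "" ∧ x.toList <+: i.toList) := by
  constructor
  · rintro ⟨j, hj, rfl⟩
    rw [PySem.List.mem_pyRange_one] at hj
    obtain ⟨h1, h2⟩ := hj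
    have hLE : PySem.Str.len i = (i.toList.length : Int) := by simp
    have hjlen : j ≤ (i.toList.length : Int) := by omega
    have htl : (PySem.Str.slice i none (some j)).toList = i.toList.take j.toNat := by
      simp [PySem.List.slice_to _ (by omega : (0:Int) ≤ j)]
    constructor
    · intro hcon
      have : (PySem.Str.slice i none (some j)).toList = [] := by simp [hcon]
      rw [htl] at this
      have : min j.toNat i.toList.length = 0 := by
        simpa using congrArg List.length this
      omega
    · rw [htl]; exact List.take_prefix _ _
  · rintro ⟨hne, hpre⟩
    refine ⟨(x.toList.length : Int), ?_, ?_⟩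
    · rw [PySem.List.mem_pyRange_one]
      have hx : x.toList ≠ [] := by simpa using hne
      have hlen : x.toList.length ≤ i.toList.length := hpre.length_le
      have hx1 : 1 ≤ x.toList.length := by
        cases h : x.toList with
        | nil => exact absurd h hx
        | cons a as => simp
      have hLE : PySem.Str.len i = (i.toList.length : Int) := by simp
      omega
    · apply String.toList_inj.mp
      have : (PySem.Str.slice i none (some ((x.toList.length : Int)))).toList
          = i.toList.take x.toList.length := by
        simp
      rw [this]
      exact (List.prefix_iff_eq_take.mp hpre)

-- the loop invariant: s holds exactly the nonempty prefixes of the strings in seen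
theorem go_eq (l : List String) :
    ∀ (s : PySem.Set String) (seen : List String),
      (∀ x, x ∈ s ↔ (x ≠ "" ∧ ∃ e ∈ seen, x.toList <+: e.toList)) →
      checkGo l s = checkAltGo l seen := by
  induction l with
  | nil => intro s seen _; rfl
  | cons i rest ih =>
      intro s seen hinv
      have hcond : PySem.Set.contains s i = true ↔
          (i ≠ "" ∧ seen.any (fun e => PySem.Str.startswith e i) = true) := by
        rw [PySem.Set.contains_iff, hinv i]
        simp [List.any_eq_true, PySem.Chars.startswith_iff]
      by_cases h : PySem.Set.contains s i = true
      · rw [checkGo, checkAltGo, if_pos h, if_pos (hcond.mp h)]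
      · rw [checkGo, checkAltGo, if_neg h, if_neg (fun hc => h (hcond.mpr hc))]
        apply ih
        intro x
        rw [mem_foldl_add, hinv x, slice_range_iff]
        constructor
        · rintro (⟨hne, e, he, hp⟩ | ⟨hne, hp⟩)
          · exact ⟨hne, e, by simp [he], hp⟩
          · exact ⟨hne, i, by simp, hp⟩
        · rintro ⟨hne, e, he, hp⟩
          rcases List.mem_append.mp he with he | he
          · exact Or.inl ⟨hne, e, he, hp⟩
          · rcases List.mem_singleton.mp he with rfl
            exact Or.inr ⟨hne, hp⟩

-- ===== VERDICT (by name: the statement is the Claim_ definition above) =====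
theorem check_spec : Claim_equal_check := by
  intro l _
  unfold Spec_check check check_alt
  exact go_eq l _ [] (by simp [PySem.Set.empty])
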